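-- pv_equiv track=rewrite | github.com/Efensun/ragflow | deepdoc/parser/code_parser.py | _clean_empty_lines
-- ===== SOURCE A (Python) =====
-- from typing import List, Dict, Tuple, Generator, Any, Callable, Optional, Union
--
-- def _clean_empty_lines(chunks: List[List[Any]]) -> List[List[Any]]:
--     """Clean excessive empty lines in chunk text
--
--     Args:
--         chunks: List of chunks
--
--     Returns:
--         Cleaned chunks
--     """
--     cleaned_chunks = []
--
--     for chunk_text, path in chunks:
--         lines = chunk_text.split('\n')
--
--         # 移除多余的空行
--         cleaned_lines = []
--         prev_empty = False
--
--         for line in lines: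
--             if line.strip() == '':
--                 if not prev_empty:
--                     cleaned_lines.append(line)
--                 prev_empty = True
--             else:
--                 cleaned_lines.append(line)
--                 prev_empty = False
--
--         cleaned_chunks.append(['\n'.join(cleaned_lines), path])
--
--     return cleaned_chunks
-- ===== SOURCE B (Python) =====
-- from itertools import groupby
--
-- def _clean_empty_lines(chunks):
--     cleaned_chunks = []
--     for chunk_text, path in chunks:
--         lines = chunk_text.split('\n')
--         cleaned_lines = []
--         # run-based: keep the first line of each empty run, all lines of a non-empty run
--         for is_empty, group in groupby(lines, key=lambda l: l.strip() == ''):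
--             if is_empty:
--                 cleaned_lines.append(next(group))
--             else:
--                 cleaned_lines.extend(group)
--         cleaned_chunks.append(['\n'.join(cleaned_lines), path])
--     return cleaned_chunks
-- ===== Notes on version B (the rewrite author's own statement) =====
-- stated objective: idiomatic
-- what changed: Replaced the manual prev_empty flag loop with an itertools.groupby run-based pass: the first line of each empty run is kept and non-empty runs are copied whole.
import Mathlib
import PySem

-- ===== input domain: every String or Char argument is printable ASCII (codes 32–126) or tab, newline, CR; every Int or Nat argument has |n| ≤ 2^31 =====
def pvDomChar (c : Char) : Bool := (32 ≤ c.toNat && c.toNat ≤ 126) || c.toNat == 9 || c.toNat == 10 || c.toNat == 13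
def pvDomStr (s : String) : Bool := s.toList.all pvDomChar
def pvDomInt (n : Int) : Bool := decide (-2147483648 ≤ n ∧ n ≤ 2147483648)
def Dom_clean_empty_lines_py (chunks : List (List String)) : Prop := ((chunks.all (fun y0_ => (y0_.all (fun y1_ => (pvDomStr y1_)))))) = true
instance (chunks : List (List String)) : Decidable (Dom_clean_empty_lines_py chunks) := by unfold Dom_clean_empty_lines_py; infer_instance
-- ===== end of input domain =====

-- B replaces A's prev_empty flag loop by a run-based (groupby) pass: keep the first
-- line of each empty run and every line of a non-empty run (objective: idiomatic).


-- ===== PORT A =====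
-- the inner 'for line in lines' loop with its prev_empty flag, as structural recursion on lines
def cleanLinesA : List String → Bool → List String
  | [], _ => []
  | l :: ls, prevEmpty =>
    if PySem.Str.strip l == "" then
      if prevEmpty then cleanLinesA ls true else l :: cleanLinesA ls true
    else l :: cleanLinesA ls false

-- the body of A's 'for chunk_text, path in chunks' loop, one chunk at a time
def cleanChunkA (c : List String) : List String :=
  match c with
  | [chunk_text, path] =>
      [PySem.Str.join "\n" (cleanLinesA ((PySem.Str.split? chunk_text "\n").getD []) false), path]
  | c => c  -- Python raises ValueError here (2-tuple unpacking); excluded by Pre_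

def clean_empty_lines_py (chunks : List (List String)) : List (List String) :=
  chunks.map cleanChunkA

-- ===== PORT B =====
-- groupby(lines, key = l.strip()==''): peel one maximal run of equal key at a time;
-- an empty run contributes only its first line, a non-empty run all of its lines
def cleanLinesB : List String → List String
  | [] => []
  | l :: ls =>
    (if PySem.Str.strip l == "" then [l]
     else l :: ls.takeWhile (fun x => (PySem.Str.strip x == "") == (PySem.Str.strip l == "")))
    ++ cleanLinesB (ls.dropWhile (fun x => (PySem.Str.strip x == "") == (PySem.Str.strip l == "")))
termination_by ls => ls.length
decreasing_by
  exact Nat.lt_succ_of_le (ls.length_dropWhile_le _)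

-- the body of B's loop: unpack the 2-list, split, groupby-clean, join
def cleanChunkB (c : List String) : List String :=
  match c with
  | chunk_text :: rest =>
      match rest with
      | [path] =>
          [PySem.Str.join "\n" (cleanLinesB ((PySem.Str.split? chunk_text "\n").getD [])), path]
      | _ => c  -- Python raises ValueError here (2-tuple unpacking); excluded by Pre_
  | [] => c  -- ValueError in Python as well; excluded by Pre_

def clean_empty_lines_py_alt (chunks : List (List String)) : List (List String) :=
  chunks.map cleanChunkB

-- ===== PRECONDITION & SPEC =====
-- Pre_ excludes inner lists whose length is not 2: Python's 'for chunk_text, path in chunks' raises ValueError there.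
def Pre_clean_empty_lines_py (chunks : List (List String)) : Prop :=
  (chunks.all (fun c => c.length == 2)) = true
instance (chunks : List (List String)) : Decidable (Pre_clean_empty_lines_py chunks) := by unfold Pre_clean_empty_lines_py; infer_instance

def pvWitness_clean_empty_lines_py : List (List String) := [["a\n\n\nb", "p"], ["", "q"]]

def Spec_clean_empty_lines_py (chunks : List (List String)) (out : List (List String)) : Prop := out = clean_empty_lines_py_alt chunks
instance (chunks : List (List String)) (out : List (List String)) : Decidable (Spec_clean_empty_lines_py chunks out) := by unfold Spec_clean_empty_lines_py; infer_instance

-- ===== CLAIM (what is proved, stated in full; the proofs are below) =====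
def Claim_equal_clean_empty_lines_py : Prop := ∀ (chunks : List (List String)), Dom_clean_empty_lines_py chunks → Pre_clean_empty_lines_py chunks → Spec_clean_empty_lines_py chunks (clean_empty_lines_py chunks)

-- ===== LEMMAS AND PROOFS =====

-- after a run of empty lines, A (with prev_empty = True) drops them all
lemma cleanA_skip_empties (run rest : List String)
    (h : ∀ x ∈ run, (PySem.Str.strip x == "") = true) :
    cleanLinesA (run ++ rest) true = cleanLinesA rest true := by
  induction run with
  | nil => rfl
  | cons x xs ih =>
      simp only [List.cons_append, cleanLinesA, h x (by simp), if_true]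
      exact ih (fun y hy => h y (by simp [hy]))

-- a run of non-empty lines is copied verbatim
lemma cleanA_keep_nonempties (run rest : List String)
    (h : ∀ x ∈ run, (PySem.Str.strip x == "") = false) :
    cleanLinesA (run ++ rest) false = run ++ cleanLinesA rest false := by
  induction run with
  | nil => rfl
  | cons x xs ih =>
      simp only [List.cons_append, cleanLinesA, h x (by simp), if_false, Bool.false_eq_true]
      simp [ih (fun y hy => h y (by simp [hy]))]

-- the flag is irrelevant when the next line is non-empty (or there is none)
lemma cleanA_true_eq_false (ls : List String)
    (h : ∀ x xs, ls = x :: xs → (PySem.Str.strip x == "") = false) :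
    cleanLinesA ls true = cleanLinesA ls false := by
  cases ls with
  | nil => rfl
  | cons x xs => simp [cleanLinesA, h x xs rfl]

lemma head_dropWhile_false {α : Type} (p : α → Bool) (l : List α) (x : α) (xs : List α)
    (h : l.dropWhile p = x :: xs) : p x = false := by
  have := List.head?_dropWhile_not p l
  rw [h] at this
  simpa using this

set_option maxHeartbeats 1000000 in
lemma cleanLines_eq : ∀ n (ls : List String), ls.length ≤ n →
    cleanLinesA ls false = cleanLinesB ls := by
  intro n
  induction n with
  | zero =>
      intro ls h
      have hnil : ls = [] := List.eq_nil_of_length_eq_zero (Nat.le_zero.mp h)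
      subst hnil
      simp [cleanLinesA, cleanLinesB]
  | succ n ih =>
      intro ls h
      cases ls with
      | nil => simp [cleanLinesA, cleanLinesB]
      | cons l ls =>
          have hlen : ∀ (p : String → Bool), (ls.dropWhile p).length ≤ n := by
            intro p
            have := ls.length_dropWhile_le p
            simp only [List.length_cons] at h
            omega
          cases hsl : (PySem.Str.strip l == "") with
          | true =>
              rw [cleanLinesB]
              simp only [hsl, beq_true, if_true, List.singleton_append, cleanLinesA]
              refine congrArg (l :: ·) ?_
              conv_lhs => rw [← List.takeWhile_append_dropWhile
                (p := fun x => PySem.Str.strip x == "") (l := ls)]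
              rw [cleanA_skip_empties _ _ (fun x hx => List.mem_takeWhile_imp (p := fun y => PySem.Str.strip y == "") hx)]
              rw [cleanA_true_eq_false _ (fun x xs hx => head_dropWhile_false _ ls x xs hx)]
              exact ih _ (hlen _)
          | false =>
              rw [cleanLinesB]
              simp only [hsl, beq_false, Bool.false_eq_true, if_false, List.cons_append]
              have hA : cleanLinesA (l :: ls) false = l :: cleanLinesA ls false := by
                simp [cleanLinesA, hsl]
              rw [hA]
              refine congrArg (l :: ·) ?_
              conv_lhs => rw [← List.takeWhile_append_dropWhile
                (p := fun x => !(PySem.Str.strip x == "")) (l := ls)]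
              rw [cleanA_keep_nonempties _ _
                (fun x hx => by simpa using List.mem_takeWhile_imp (p := fun y => !(PySem.Str.strip y == "")) hx)]
              rw [ih _ (hlen _)]

lemma cleanLines_eq' (ls : List String) : cleanLinesA ls false = cleanLinesB ls :=
  cleanLines_eq ls.length ls (le_refl _)

-- ===== VERDICT (by name: the statement is the Claim_ definition above) =====
theorem clean_empty_lines_py_spec : Claim_equal_clean_empty_lines_py := by
  intro chunks _ _
  show clean_empty_lines_py chunks = clean_empty_lines_py_alt chunks
  unfold clean_empty_lines_py clean_empty_lines_py_alt
  apply List.map_congr_left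
  intro c _
  match c with
  | [] => rfl
  | [_] => rfl
  | [t, p] => simp [cleanChunkA, cleanChunkB, cleanLines_eq']
  | _ :: _ :: _ :: _ => rfl
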